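-- pv_equiv track=rewrite | github.com/Metactal/Picture-to-unicode-converter | bichromaLibShadedEdition.py | convertImageToShades
-- ===== SOURCE A (Python) =====
-- def convertImageToShades(pixels,dark): # does exactly as it says
--     rows = []
--     for i in range(len(pixels)): # for the height of the image
--         row = []
--         for j in range(len(pixels[i])): # for the width of the image
--
--             if dark: # if the background is dark, the characters will be light, so "██" will represent white. Otherwise "  " will represent white
--                 if pixels[i][j] > (4/5)*765:row.append("██")
--                 elif pixels[i][j] > (3/5)*765:row.append("▓▓")
--                 elif pixels[i][j] > (2/5)*765:row.append("▒▒")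
--                 elif pixels[i][j] > (1/5)*765:row.append("░░")
--                 else: row.append("  ")
--             else:
--                 if pixels[i][j] > (4/5)*765:row.append("  ")
--                 elif pixels[i][j] > (3/5)*765:row.append("░░")
--                 elif pixels[i][j] > (2/5)*765:row.append("▒▒")
--                 elif pixels[i][j] > (1/5)*765:row.append("▓▓")
--                 else: row.append("██")
--
--         rows.append(''.join(row))
--     return '\n'.join(rows)
-- ===== SOURCE B (Python) =====
-- def convertImageToShades(pixels, dark):
--     # Branch-free arithmetic: brightness level = clamp((p-1)//153, 0, 4) (765/5 = 153,
--     # strict '>' thresholds), mirrored for a light background, then a 2-char slice of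
--     # one shade string -- no comparison cascade, no per-case table.
--     shades = "  \u2591\u2591\u2592\u2592\u2593\u2593\u2588\u2588"
--     def cell(p):
--         level = min(max((p - 1) // 153, 0), 4)
--         idx = level if dark else 4 - level
--         return shades[2 * idx:2 * idx + 2]
--     return '\n'.join(''.join(map(cell, row)) for row in pixels)
-- ===== Notes on version B (the rewrite author's own statement) =====
-- stated objective: simpler
-- what changed: Replaces the duplicated five-way if/elif chains with branch-free arithmetic: shade level = clamp((p-1)//153, 0, 4), index mirrored for a light background, and each cell taken as a 2-char slice of a single shade string.
import Mathlib
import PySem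

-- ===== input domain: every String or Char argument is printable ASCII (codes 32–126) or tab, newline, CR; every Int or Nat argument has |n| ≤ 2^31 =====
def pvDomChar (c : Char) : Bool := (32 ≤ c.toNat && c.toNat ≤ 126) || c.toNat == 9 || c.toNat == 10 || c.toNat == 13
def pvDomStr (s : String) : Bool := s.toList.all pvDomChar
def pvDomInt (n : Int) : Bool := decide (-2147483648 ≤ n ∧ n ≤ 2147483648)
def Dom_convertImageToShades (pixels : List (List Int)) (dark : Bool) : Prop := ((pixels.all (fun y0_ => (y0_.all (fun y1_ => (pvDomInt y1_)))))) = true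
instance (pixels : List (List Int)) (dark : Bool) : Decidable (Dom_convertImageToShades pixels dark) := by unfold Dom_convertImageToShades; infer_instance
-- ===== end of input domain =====

-- B replaces A's duplicated five-way if/elif chains by branch-free arithmetic: the shade level is
-- clamp((p-1)//153, 0, 4) (765/5 = 153; floor division reproduces the strict '>' thresholds),
-- mirrored for a light background, and the cell is a 2-char slice of one shade string; objective: simpler.

-- ===== PORT A =====
def convertImageToShades (pixels : List (List Int)) (dark : Bool) : String :=
  let rows := (PySem.List.pyRange 0 (pixels.length : Int) 1).foldl (fun rows i =>
    let pi := PySem.List.pyGetD pixels i []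
    let row := (PySem.List.pyRange 0 (pi.length : Int) 1).foldl (fun row j =>
      let p := PySem.List.pyGetD pi j 0
      if dark then
        if p > 612 then row ++ ["██"]
        else if p > 459 then row ++ ["▓▓"]
        else if p > 306 then row ++ ["▒▒"]
        else if p > 153 then row ++ ["░░"]
        else row ++ ["  "]
      else
        if p > 612 then row ++ ["  "]
        else if p > 459 then row ++ ["░░"]
        else if p > 306 then row ++ ["▒▒"]
        else if p > 153 then row ++ ["▓▓"]
        else row ++ ["██"]) []
    rows ++ [PySem.Str.join "" row]) []
  PySem.Str.join "\n" rows

-- ===== PORT B =====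
def pvShades : List Char := "  ░░▒▒▓▓██".toList

def pvCellB (dark : Bool) (p : Int) : String :=
  let level := min (max (PySem.Int.floordiv (p - 1) 153) 0) 4
  let idx := if dark then level else 4 - level
  String.mk (PySem.List.slice pvShades (some (2 * idx)) (some (2 * idx + 2)))

def convertImageToShades_alt (pixels : List (List Int)) (dark : Bool) : String :=
  PySem.Str.join "\n" (pixels.map (fun row =>
    PySem.Str.join "" (row.map (pvCellB dark))))

-- ===== PRECONDITION & SPEC =====
def Spec_convertImageToShades (pixels : List (List Int)) (dark : Bool) (out : String) : Prop := out = convertImageToShades_alt pixels dark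
instance (pixels : List (List Int)) (dark : Bool) (out : String) : Decidable (Spec_convertImageToShades pixels dark out) := by unfold Spec_convertImageToShades; infer_instance

-- ===== CLAIM (what is proved, stated in full; the proofs are below) =====
def Claim_equal_convertImageToShades : Prop := ∀ (pixels : List (List Int)) (dark : Bool), Dom_convertImageToShades pixels dark → Spec_convertImageToShades pixels dark (convertImageToShades pixels dark)

-- ===== LEMMAS AND PROOFS =====

-- A's if/elif chain for one pixel equals B's sliced cell at the pixel's clamped level.
theorem pvCell_eq (dark : Bool) (p : Int) :
    (if dark then
        if p > 612 then "██"
        else if p > 459 then "▓▓"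
        else if p > 306 then "▒▒"
        else if p > 153 then "░░"
        else "  "
      else
        if p > 612 then "  "
        else if p > 459 then "░░"
        else if p > 306 then "▒▒"
        else if p > 153 then "▓▓"
        else "██") = pvCellB dark p := by
  unfold pvCellB
  rw [PySem.Int.floordiv_eq_ediv_of_pos (by norm_num : (0:Int) < 153)]
  cases dark <;> split_ifs with h1 h2 h3 h4 <;>
    · first
        | (rw [show min (max ((p - 1) / 153) 0) 4 = 4 from by omega]; decide)
        | (rw [show min (max ((p - 1) / 153) 0) 4 = 3 from by omega]; decide)
        | (rw [show min (max ((p - 1) / 153) 0) 4 = 2 from by omega]; decide)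
        | (rw [show min (max ((p - 1) / 153) 0) 4 = 1 from by omega]; decide)
        | (rw [show min (max ((p - 1) / 153) 0) 4 = 0 from by omega]; decide)

theorem pvRow_eq (dark : Bool) (pi : List Int) :
    (PySem.List.pyRange 0 (pi.length : Int) 1).foldl (fun row j =>
      let p := PySem.List.pyGetD pi j 0
      if dark then
        if p > 612 then row ++ ["██"]
        else if p > 459 then row ++ ["▓▓"]
        else if p > 306 then row ++ ["▒▒"]
        else if p > 153 then row ++ ["░░"]
        else row ++ ["  "]
      else
        if p > 612 then row ++ ["  "]
        else if p > 459 then row ++ ["░░"]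
        else if p > 306 then row ++ ["▒▒"]
        else if p > 153 then row ++ ["▓▓"]
        else row ++ ["██"])
      ([] : List String)
    = pi.map (pvCellB dark) := by
  rw [show (fun (row : List String) (j : Int) =>
        let p := PySem.List.pyGetD pi j 0
        if dark then
          if p > 612 then row ++ ["██"]
          else if p > 459 then row ++ ["▓▓"]
          else if p > 306 then row ++ ["▒▒"]
          else if p > 153 then row ++ ["░░"]
          else row ++ ["  "]
        else
          if p > 612 then row ++ ["  "]
          else if p > 459 then row ++ ["░░"]
          else if p > 306 then row ++ ["▒▒"]
          else if p > 153 then row ++ ["▓▓"]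
          else row ++ ["██"])
      = (fun row j => row ++ [pvCellB dark (PySem.List.pyGetD pi j 0)]) from by
    funext row j
    simp only
    rw [← pvCell_eq dark (PySem.List.pyGetD pi j 0)]
    split_ifs <;> rfl]
  rw [PySem.List.foldl_pyRange_zero_pyGetD' pi 0
    (fun row p => row ++ [pvCellB dark p]) []]
  simpa using PySem.List.foldl_append_singleton_eq_map
    (f := pvCellB dark) (l := pi) (acc := [])

-- ===== VERDICT (by name: the statement is the Claim_ definition above) =====
theorem convertImageToShades_spec : Claim_equal_convertImageToShades := by
  intro pixels dark _
  show convertImageToShades pixels dark = convertImageToShades_alt pixels dark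
  unfold convertImageToShades convertImageToShades_alt
  simp only
  rw [PySem.List.foldl_pyRange_zero_pyGetD' pixels []
    (fun rows pi => rows ++ [PySem.Str.join "" ((PySem.List.pyRange 0 (pi.length : Int) 1).foldl (fun row j =>
      let p := PySem.List.pyGetD pi j 0
      if dark then
        if p > 612 then row ++ ["██"]
        else if p > 459 then row ++ ["▓▓"]
        else if p > 306 then row ++ ["▒▒"]
        else if p > 153 then row ++ ["░░"]
        else row ++ ["  "]
      else
        if p > 612 then row ++ ["  "]
        else if p > 459 then row ++ ["░░"]
        else if p > 306 then row ++ ["▒▒"]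
        else if p > 153 then row ++ ["▓▓"]
        else row ++ ["██"]) [])]) []]
  rw [PySem.List.foldl_append_singleton_eq_map]
  simp only [pvRow_eq, List.nil_append]
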